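-- pv_equiv track=rewrite | github.com/mxtdluffy/UNSW-CSE-COURSES | COMP9021/Assignment/Assignment1/Q4/tunnel.py | find_west_tunnel
-- ===== SOURCE A (Python) =====
-- def find_west_tunnel(tunnel):
--     west_tunnel = 0
--     for i in range(len(tunnel[0])):
--         height = min(tunnel[0][:(i + 1)])
--         if height <= max(tunnel[1][:(i + 1)]):
--             break
--         else:
--             west_tunnel += 1
--
--     return west_tunnel
-- ===== SOURCE B (Python) =====
-- def find_west_tunnel(tunnel):
--     top = tunnel[0]
--     if not top:
--         return 0
--     bot = tunnel[1]
--     mn, mx = top[0], bot[0]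
--     count = 0
--     for i in range(len(top)):
--         mn = min(mn, top[i])
--         if i < len(bot):
--             mx = max(mx, bot[i])
--         if mn <= mx:
--             break
--         count += 1
--     return count
-- ===== Notes on version B (the rewrite author's own statement) =====
-- stated objective: alternative
-- what changed: Replaces A's per-column recomputation of min(top[:i+1]) and max(bot[:i+1]) with a single pass maintaining a running minimum of the top row and a running maximum of the bottom row.
import Mathlib
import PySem

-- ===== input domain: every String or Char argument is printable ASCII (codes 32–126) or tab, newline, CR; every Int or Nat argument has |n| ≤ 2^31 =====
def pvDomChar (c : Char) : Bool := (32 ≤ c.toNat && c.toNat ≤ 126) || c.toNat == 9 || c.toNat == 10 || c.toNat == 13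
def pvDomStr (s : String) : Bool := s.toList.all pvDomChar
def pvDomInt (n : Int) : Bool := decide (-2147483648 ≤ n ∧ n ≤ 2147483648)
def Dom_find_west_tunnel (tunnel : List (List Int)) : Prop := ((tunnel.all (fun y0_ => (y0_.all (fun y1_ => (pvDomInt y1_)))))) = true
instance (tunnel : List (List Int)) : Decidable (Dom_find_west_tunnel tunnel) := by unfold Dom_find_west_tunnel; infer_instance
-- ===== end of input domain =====

-- B maintains running min/max accumulators in one pass instead of recomputing the prefix min/max slices at every column.

-- ===== PORT A =====
-- A's loop: for i in range(len(top)): height = min(top[:i+1]); if height <= max(bot[:i+1]): break; else west += 1.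
-- min/max of a slice: xs[:i+1] = take (i+1); Python min/max raise on []; Pre_ excludes inputs
-- where an empty slice is reached, so '.getD 0' on min?/max? is never the value used.
def findWestLoopA (top bot : List Int) (i : Nat) (west : Int) : Int :=
  if _h : i < top.length then
    let height := ((top.take (i + 1)).min?).getD 0
    if height ≤ ((bot.take (i + 1)).max?).getD 0 then west
    else findWestLoopA top bot (i + 1) (west + 1)
  else west
termination_by top.length - i

def find_west_tunnel (tunnel : List (List Int)) : Int :=
  -- tunnel[0] / tunnel[1]; Pre_ excludes the IndexError cases, so '.getD []' is never the value used
  let top := ((PySem.List.pyGet? tunnel 0).getD [])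
  let bot := ((PySem.List.pyGet? tunnel 1).getD [])
  findWestLoopA top bot 0 0

-- ===== PORT B =====
def findWestLoopB (top bot : List Int) (i : Nat) (mn mx count : Int) : Int :=
  if _h : i < top.length then
    let mn' := min mn (top.getD i 0)
    let mx' := if i < bot.length then max mx (bot.getD i 0) else mx
    if mn' ≤ mx' then count
    else findWestLoopB top bot (i + 1) mn' mx' (count + 1)
  else count
termination_by top.length - i

def find_west_tunnel_alt (tunnel : List (List Int)) : Int :=
  match (PySem.List.pyGet? tunnel 0).getD [] with
  | [] => 0
  | t0 :: ts =>
    let bot := (PySem.List.pyGet? tunnel 1).getD []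
    let mx0 := (PySem.List.pyGet? bot 0).getD 0   -- bot[0]; Pre_ excludes bot = []
    findWestLoopB (t0 :: ts) bot 0 t0 mx0 0

-- ===== PRECONDITION & SPEC =====
-- Pre_ excludes exactly the inputs where A raises: tunnel = [] (IndexError on tunnel[0]);
-- and, when row 0 is nonempty, a missing row 1 (IndexError) or an empty row 1 (ValueError on max([])).
def Pre_find_west_tunnel (tunnel : List (List Int)) : Prop :=
  tunnel ≠ [] ∧ (tunnel.getD 0 [] = [] ∨ (2 ≤ tunnel.length ∧ tunnel.getD 1 [] ≠ []))
instance (tunnel : List (List Int)) : Decidable (Pre_find_west_tunnel tunnel) := by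
  unfold Pre_find_west_tunnel; infer_instance

def pvWitness_find_west_tunnel : List (List Int) := [[3, 2], [0, 1]]

def Spec_find_west_tunnel (tunnel : List (List Int)) (out : Int) : Prop := out = find_west_tunnel_alt tunnel
instance (tunnel : List (List Int)) (out : Int) : Decidable (Spec_find_west_tunnel tunnel out) := by unfold Spec_find_west_tunnel; infer_instance

-- ===== CLAIM (what is proved, stated in full; the proofs are below) =====
def Claim_equal_find_west_tunnel : Prop := ∀ (tunnel : List (List Int)), Dom_find_west_tunnel tunnel → Pre_find_west_tunnel tunnel → Spec_find_west_tunnel tunnel (find_west_tunnel tunnel)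

-- ===== LEMMAS AND PROOFS =====

theorem min_append_singleton (xs : List Int) : ∀ (x y : Int),
    (((x :: xs) ++ [y]).min?).getD 0 = min (((x :: xs).min?).getD 0) y := by
  induction xs with
  | nil => intro x y; simp [List.min?]
  | cons a as ih =>
    intro x y
    simp only [List.cons_append] at *
    simp at *
    simp_all

theorem max_append_singleton (xs : List Int) : ∀ (x y : Int),
    (((x :: xs) ++ [y]).max?).getD 0 = max (((x :: xs).max?).getD 0) y := by
  induction xs with
  | nil => intro x y; simp [List.max?]
  | cons a as ih =>
    intro x y
    simp only [List.cons_append] at *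
    simp at *
    simp_all

theorem min_take_step (l : List Int) (i : Nat) (h : i + 1 < l.length) :
    ((l.take (i + 2)).min?).getD 0 = min (((l.take (i + 1)).min?).getD 0) (l.getD (i + 1) 0) := by
  obtain ⟨x, xs, rfl⟩ : ∃ x xs, l = x :: xs := by
    cases l with
    | nil => simp at h
    | cons a b => exact ⟨a, b, rfl⟩
  have ht : (x :: xs).take (i + 2) = (x :: xs).take (i + 1) ++ [(x :: xs).getD (i + 1) 0] := by
    rw [List.take_add_one]
    simp [List.getElem?_eq_getElem h, List.getD_eq_getElem?_getD]
  rw [ht]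
  have h2 : (x :: xs).take (i + 1) = x :: xs.take i := by simp
  rw [h2, min_append_singleton]

theorem max_take_step (l : List Int) (i : Nat) (h : i + 1 < l.length) :
    ((l.take (i + 2)).max?).getD 0 = max (((l.take (i + 1)).max?).getD 0) (l.getD (i + 1) 0) := by
  obtain ⟨x, xs, rfl⟩ : ∃ x xs, l = x :: xs := by
    cases l with
    | nil => simp at h
    | cons a b => exact ⟨a, b, rfl⟩
  have ht : (x :: xs).take (i + 2) = (x :: xs).take (i + 1) ++ [(x :: xs).getD (i + 1) 0] := by
    rw [List.take_add_one]
    simp [List.getElem?_eq_getElem h, List.getD_eq_getElem?_getD]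
  rw [ht]
  have h2 : (x :: xs).take (i + 1) = x :: xs.take i := by simp
  rw [h2, max_append_singleton]

-- when the whole of l is already taken, taking one more changes nothing
theorem take_saturate (l : List Int) (i : Nat) (h : l.length ≤ i + 1) :
    l.take (i + 2) = l.take (i + 1) := by
  rw [List.take_of_length_le h, List.take_of_length_le (by omega)]

-- invariant: min mn top[i] / max mx bot[i] are exactly A's prefix min/max at column i
theorem loop_eq (top bot : List Int) (hb : bot ≠ []) :
    ∀ (n i : Nat) (west mn mx : Int), n = top.length - i →
    (i < top.length → min mn (top.getD i 0) = ((top.take (i + 1)).min?).getD 0) →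
    ((if i < bot.length then max mx (bot.getD i 0) else mx) = ((bot.take (i + 1)).max?).getD 0) →
    findWestLoopA top bot i west = findWestLoopB top bot i mn mx west := by
  intro n
  induction n with
  | zero =>
    intro i west mn mx hn _ _
    rw [findWestLoopA, findWestLoopB]
    have : ¬ i < top.length := by omega
    simp [this]
  | succ k ih =>
    intro i west mn mx hn hmn hmx
    rw [findWestLoopA, findWestLoopB]
    by_cases hi : i < top.length
    · simp only [hi, dif_pos]
      rw [hmn hi, hmx]
      by_cases hc : ((top.take (i + 1)).min?).getD 0 ≤ ((bot.take (i + 1)).max?).getD 0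
      · simp [hc]
      · simp only [hc, if_false]
        apply ih (i + 1) (west + 1) _ _ (by omega)
        · intro hi1
          rw [min_take_step top i hi1]
        · by_cases hbi : i + 1 < bot.length
          · simp only [hbi, if_pos]
            rw [max_take_step bot i hbi]
          · simp only [hbi, if_false]
            rw [take_saturate bot i (by omega)]
    · simp [hi]

theorem find_west_tunnel_spec' (tunnel : List (List Int))
    (hpre : Pre_find_west_tunnel tunnel) :
    find_west_tunnel tunnel = find_west_tunnel_alt tunnel := by
  obtain ⟨hne, hcase⟩ := hpre
  unfold find_west_tunnel find_west_tunnel_alt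
  obtain ⟨row0, rest, rfl⟩ : ∃ r rs, tunnel = r :: rs := by
    cases tunnel with
    | nil => exact absurd rfl hne
    | cons a b => exact ⟨a, b, rfl⟩
  cases row0 with
  | nil =>
    simp [PySem.List.pyGet?, PySem.List.pyIdx?, findWestLoopA]
  | cons t0 ts =>
    simp only [List.getD, List.getElem?_cons_zero, Option.getD_some] at hcase
    rcases hcase with h0 | ⟨hlen, hb⟩
    · exact absurd h0 (by simp)
    · obtain ⟨row1, rest', rfl⟩ : ∃ r rs, rest = r :: rs := by
        cases rest with
        | nil => simp at hlen
        | cons a b => exact ⟨a, b, rfl⟩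
      simp only [List.getElem?_cons_succ, List.getElem?_cons_zero, Option.getD_some] at hb
      obtain ⟨b0, bs, rfl⟩ : ∃ x xs, row1 = x :: xs := by
        cases row1 with
        | nil => exact absurd rfl hb
        | cons a b => exact ⟨a, b, rfl⟩
      simp only [PySem.List.pyGet?, PySem.List.pyIdx?]
      simp
      apply loop_eq (t0 :: ts) (b0 :: bs) (by simp) ((t0 :: ts).length - 0) 0 0 t0 b0 rfl
      · intro _
        simp [List.min?]
      · simp [List.max?]

-- ===== VERDICT (by name: the statement is the Claim_ definition above) =====
theorem find_west_tunnel_spec : Claim_equal_find_west_tunnel := by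
  intro tunnel _ hpre
  exact find_west_tunnel_spec' tunnel hpre
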